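-- pv_equiv track=rewrite | github.com/Seunghoon-Schini-Yang/Algorithm_Schini | 프로그래머스/2/42860. 조이스틱/조이스틱.py | solution
-- ===== SOURCE A (Python) =====
-- import string
--
-- def solution(name):
--     char_idx_dict = {char:min(26-idx, idx) for idx, char in enumerate(string.ascii_uppercase)}
--     cnt = sum(char_idx_dict[char] for char in name)
--     n = len(name)
--     required = [i for i in range(1, n) if name[i] != 'A']
--     if not required:
--         pass
--     elif len(required) == 1:
--         cnt += min(required[0], n-required[0])
--     else:
--         cnt += min(
--             min(min(required[i-1]*2 + n-required[i], (n-required[i])*2 + required[i-1]) for i in range(1, len(required))),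
--             required[-1],
--             n-required[0]
--         )
--     return cnt
-- ===== SOURCE B (Python) =====
-- import string
--
-- def next_non_a(name, j):
--     while j < len(name) and name[j] == 'A':
--         j += 1
--     return j
--
-- def solution(name):
--     n = len(name)
--     total = 0
--     for c in name:
--         i = string.ascii_uppercase.index(c)
--         total += min(i, 26 - i)
--     move = min((min(2 * i + n - next_non_a(name, i + 1),
--                     i + 2 * (n - next_non_a(name, i + 1)))
--                 for i in range(n)), default=0)
--     return total + move
-- ===== Notes on version B (the rewrite author's own statement) =====
-- stated objective: idiomatic
-- what changed: B drops the required-index list and its closed-form min over adjacent pairs in favour of the canonical greedy turnaround scan (for each position, skip the following run of letter-A characters and take the better of right-then-left vs left-then-right), and computes the vertical cost from the alphabet index instead of a precomputed dict.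
import Mathlib
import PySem

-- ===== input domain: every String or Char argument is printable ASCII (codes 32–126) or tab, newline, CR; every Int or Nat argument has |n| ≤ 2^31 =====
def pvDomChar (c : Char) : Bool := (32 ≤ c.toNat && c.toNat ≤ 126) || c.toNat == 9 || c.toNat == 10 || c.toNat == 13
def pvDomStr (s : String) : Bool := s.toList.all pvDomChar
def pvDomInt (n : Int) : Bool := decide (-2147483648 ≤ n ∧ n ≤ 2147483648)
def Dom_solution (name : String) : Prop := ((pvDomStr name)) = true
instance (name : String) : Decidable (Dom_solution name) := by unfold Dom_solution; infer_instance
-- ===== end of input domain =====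

-- B replaces A's required-index-list closed-form min with the canonical greedy turnaround scan
-- (skip the run of 'A's after each position, try right-then-left vs left-then-right); same exact values.

-- ===== PORT A =====
-- string.ascii_uppercase
def pvUpper : List Char := "ABCDEFGHIJKLMNOPQRSTUVWXYZ".toList

-- {char: min(26-idx, idx) for idx, char in enumerate(string.ascii_uppercase)}
def pvCharDict : PySem.Dict Char Int :=
  (PySem.List.enumerate pvUpper 0).foldl
    (fun acc p => acc.insert p.2 (min (26 - p.1) p.1)) PySem.Dict.empty

-- required = [i for i in range(1, n) if name[i] != 'A']
def pvRequired (name : String) : List Int :=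
  (PySem.List.pyRange 1 (PySem.Str.len name) 1).filter
    (fun i => decide (PySem.Str.pyGet? name i ≠ some 'A'))

def solution (name : String) : Int :=
  -- char_idx_dict[char] raises KeyError on a non-uppercase char: those inputs are excluded by
  -- Pre_; inside Pre_ the lookup always succeeds and the .getD 0 below never fires.
  let cnt := name.toList.foldl (fun s c => s + ((pvCharDict.get? c).getD 0)) 0
  let n : Int := PySem.Str.len name
  let required := pvRequired name
  match required with
  | [] => cnt
  | [r0] => cnt + min r0 (n - r0)
  | _ :: _ :: _ =>
    -- min over i in range(1, len(required)); the generator is nonempty here (len ≥ 2), .getD 0 never fires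
    let inner := (PySem.List.pyRange 1 (required.length : Int) 1).map (fun i =>
        min (PySem.List.pyGetD required (i - 1) 0 * 2 + n - PySem.List.pyGetD required i 0)
            ((n - PySem.List.pyGetD required i 0) * 2 + PySem.List.pyGetD required (i - 1) 0))
    cnt + min (min ((PySem.List.min? inner (fun x => x)).getD 0)
                   (PySem.List.pyGetD required (-1) 0))
              (n - PySem.List.pyGetD required 0 0)

-- ===== PORT B =====
-- def next_non_a(name, j): while j < len(name) and name[j] == 'A': j += 1; return j
def nextNonA (cs : List Char) (j : Nat) : Nat :=
  if h : j < cs.length then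
    if cs[j] = 'A' then nextNonA cs (j + 1) else j
  else j
termination_by cs.length - j

def solution_alt (name : String) : Int :=
  let cs := name.toList
  let n := cs.length
  -- string.ascii_uppercase.index(c) raises ValueError on a non-uppercase char: excluded by Pre_,
  -- so the .getD 0 never fires inside Pre_ (list index? = str index on the 1-char string)
  let total := cs.foldl (fun s c =>
      s + min (((PySem.List.index? pvUpper c).getD 0 : Nat) : Int) (26 - (((PySem.List.index? pvUpper c).getD 0 : Nat) : Int))) 0
  -- min( (min(2i + n - nxt, i + 2(n - nxt)) for i in range(n)), default=0 )
  let cands := (List.range n).map (fun (i : Nat) =>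
      min (2 * (i : Int) + (n : Int) - ((nextNonA cs (i + 1) : Nat) : Int))
          ((i : Int) + 2 * ((n : Int) - ((nextNonA cs (i + 1) : Nat) : Int))))
  total + (PySem.List.min? cands (fun x => x)).getD 0

-- ===== PRECONDITION & SPEC =====
-- Pre_: exactly the inputs on which A returns: every character is an uppercase ASCII letter
-- (on any other character A's dict lookup raises KeyError).
def Pre_solution (name : String) : Prop :=
  (name.toList.all (fun c => 65 ≤ c.toNat && c.toNat ≤ 90)) = true
instance (name : String) : Decidable (Pre_solution name) := by unfold Pre_solution; infer_instance

def pvWitness_solution : String := "JAN"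

def Spec_solution (name : String) (out : Int) : Prop := out = solution_alt name
instance (name : String) (out : Int) : Decidable (Spec_solution name out) := by
  unfold Spec_solution; infer_instance

-- ===== CLAIM (what is proved, stated in full; the proofs are below) =====
def Claim_equal_solution : Prop :=
  ∀ (name : String), Dom_solution name → Pre_solution name → Spec_solution name (solution name)

-- ===== LEMMAS AND PROOFS =====

-- B's candidate value at position i (the body of the generator in Source B)
def fI (cs : List Char) (i : Nat) : Int :=
  min (2 * (i : Int) + (cs.length : Int) - ((nextNonA cs (i + 1) : Nat) : Int))
      ((i : Int) + 2 * ((cs.length : Int) - ((nextNonA cs (i + 1) : Nat) : Int)))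

-- B's horizontal move
def moveOf (cs : List Char) : Int :=
  (PySem.List.min? ((List.range cs.length).map (fun (i : Nat) => fI cs i)) (fun x => x)).getD 0

theorem alt_eq (name : String) :
    solution_alt name
      = name.toList.foldl (fun s c =>
          s + min (((PySem.List.index? pvUpper c).getD 0 : Nat) : Int) (26 - (((PySem.List.index? pvUpper c).getD 0 : Nat) : Int))) 0
        + moveOf name.toList := rfl

-- ---- nextNonA characterization ----
theorem nextNonA_ge (cs : List Char) (j : Nat) : j ≤ nextNonA cs j := by
  fun_induction nextNonA cs j with
  | case1 j h hA ih => omega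
  | case2 j h hA => omega
  | case3 j h => omega

theorem nextNonA_le (cs : List Char) (j : Nat) (h : j ≤ cs.length) : nextNonA cs j ≤ cs.length := by
  fun_induction nextNonA cs j with
  | case1 j h hA ih => exact ih (by omega)
  | case2 j h hA => omega
  | case3 j h => omega

theorem nextNonA_all_A (cs : List Char) (j k : Nat) (h1 : j ≤ k) (h2 : k < nextNonA cs j) :
    cs[k]? = some 'A' := by
  fun_induction nextNonA cs j with
  | case1 j h hA ih =>
      rcases Nat.eq_or_lt_of_le h1 with rfl | hlt
      · simp [List.getElem?_eq_getElem h, hA]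
      · exact ih hlt h2
  | case2 j h hA => omega
  | case3 j h => omega

theorem nextNonA_not_A (cs : List Char) (j : Nat) (h : nextNonA cs j < cs.length) :
    ¬ cs[nextNonA cs j]? = some 'A' := by
  fun_induction nextNonA cs j with
  | case1 j hj hA ih => exact ih h
  | case2 j hj hA => simp [List.getElem?_eq_getElem hj, hA]
  | case3 j hj => omega

theorem nextNonA_eq (cs : List Char) (j m : Nat) (h1 : j ≤ m) (h2 : m ≤ cs.length)
    (hA : ∀ k, j ≤ k → k < m → cs[k]? = some 'A')
    (hm : m = cs.length ∨ ¬ cs[m]? = some 'A') : nextNonA cs j = m := by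
  by_contra hne
  rcases Nat.lt_or_ge (nextNonA cs j) m with hlt | hge
  · have hx := hA (nextNonA cs j) (nextNonA_ge cs j) hlt
    exact nextNonA_not_A cs j (by omega) hx
  · have hlt : m < nextNonA cs j := by omega
    have hx := nextNonA_all_A cs j m h1 hlt
    rcases hm with rfl | hm
    · have := nextNonA_le cs j (by omega)
      omega
    · exact hm hx

-- ---- required characterization ----
theorem mem_pvRequired (name : String) (i : Int) :
    i ∈ pvRequired name
      ↔ 1 ≤ i ∧ i < (name.toList.length : Int) ∧ ¬ name.toList[i.toNat]? = some 'A' := by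
  unfold pvRequired
  rw [List.mem_filter, PySem.List.mem_pyRange_one]
  constructor
  · rintro ⟨⟨h1, h2⟩, h3⟩
    rw [PySem.Str.len_eq] at h2
    refine ⟨h1, h2, ?_⟩
    have := of_decide_eq_true h3
    rwa [PySem.Str.pyGet?_eq, PySem.Chars.pyGet?,
      show PySem.List.pyGet? name.toList i = name.toList[i.toNat]? from
        PySem.List.pyGet?_of_nonneg _ (by omega : (0:Int) ≤ i)] at this
  · rintro ⟨h1, h2, h3⟩
    refine ⟨⟨h1, by rw [PySem.Str.len_eq]; exact h2⟩, decide_eq_true ?_⟩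
    rwa [PySem.Str.pyGet?_eq, PySem.Chars.pyGet?,
      show PySem.List.pyGet? name.toList i = name.toList[i.toNat]? from
        PySem.List.pyGet?_of_nonneg _ (by omega : (0:Int) ≤ i)]

theorem pvRequired_sorted (name : String) : (pvRequired name).Pairwise (· < ·) :=
  (PySem.List.pairwise_lt_pyRange_one 1 (PySem.Str.len name)).filter _

theorem req_not_mem (name : String) (j : Int) (h1 : 1 ≤ j)
    (h2 : j < (name.toList.length : Int)) (hn : j ∉ pvRequired name) :
    name.toList[j.toNat]? = some 'A' := by
  by_contra hx
  exact hn ((mem_pvRequired name j).2 ⟨h1, h2, hx⟩)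

-- the workhorse: compute nextNonA from membership in required
theorem nextNonA_req (name : String) (j m : Nat) (h0 : 1 ≤ j) (h1 : j ≤ m)
    (h2 : m ≤ name.toList.length)
    (hA : ∀ k : Nat, j ≤ k → k < m → ((k : Int) ∉ pvRequired name))
    (hm : m = name.toList.length ∨ ((m : Int)) ∈ pvRequired name) :
    nextNonA name.toList j = m := by
  apply nextNonA_eq name.toList j m h1 h2
  · intro k hk1 hk2
    have hn := hA k hk1 hk2
    have := req_not_mem name (k : Int) (by omega) (by omega) hn
    simpa using this
  · rcases hm with h | h
    · exact Or.inl h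
    · right
      have := (mem_pvRequired name (m : Int)).1 h
      simpa using this.2.2

-- ---- generic sorted-list lemmas ----
theorem mem_zip_fst {r : List Int} {a b : Int} (h : (a, b) ∈ r.zip r.tail) : a ∈ r :=
  (List.of_mem_zip h).1

theorem mem_zip_snd {r : List Int} {a b : Int} (h : (a, b) ∈ r.zip r.tail) : b ∈ r :=
  List.mem_of_mem_tail (List.of_mem_zip h).2

theorem sorted_head_le {r : List Int} (hs : r.Pairwise (· < ·)) (h : r ≠ []) :
    ∀ c ∈ r, r.head h ≤ c := by
  match r with
  | x :: t =>
    intro c hc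
    rcases List.mem_cons.1 hc with rfl | hc
    · simp
    · have := (List.pairwise_cons.1 hs).1 c hc
      simp; omega

theorem sorted_le_last {r : List Int} (hs : r.Pairwise (· < ·)) (h : r ≠ []) :
    ∀ c ∈ r, c ≤ r.getLast h := by
  induction r with
  | nil => simp at h
  | cons x t ih =>
    intro c hc
    rcases List.pairwise_cons.1 hs with ⟨hx, ht⟩
    cases t with
    | nil => simp at hc; simp [hc]
    | cons y u =>
      rw [List.getLast_cons (by simp)]
      rcases List.mem_cons.1 hc with rfl | hc
      · have := ih ht (by simp) y (by simp)
        have hxy := hx y (by simp)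
        omega
      · exact ih ht (by simp) c hc

theorem zip_lt {r : List Int} (hs : r.Pairwise (· < ·)) {a b : Int}
    (h : (a, b) ∈ r.zip r.tail) : a < b := by
  induction r with
  | nil => simp at h
  | cons x t ih =>
    cases t with
    | nil => simp at h
    | cons y u =>
      rcases List.pairwise_cons.1 hs with ⟨hx, ht⟩
      simp only [List.tail_cons, List.zip_cons_cons, List.mem_cons] at h
      rcases h with h | h
      · simp only [Prod.mk.injEq] at h
        obtain ⟨rfl, rfl⟩ := h
        exact hx b (by simp)
      · exact ih ht h

theorem sorted_gap {r : List Int} (hs : r.Pairwise (· < ·)) {a b : Int}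
    (hab : (a, b) ∈ r.zip r.tail) : ∀ c ∈ r, ¬ (a < c ∧ c < b) := by
  induction r with
  | nil => simp at hab
  | cons x t ih =>
    cases t with
    | nil => simp at hab
    | cons y u =>
      rcases List.pairwise_cons.1 hs with ⟨hx, ht⟩
      simp only [List.tail_cons, List.zip_cons_cons, List.mem_cons] at hab
      intro c hc
      rcases hab with h | h
      · simp only [Prod.mk.injEq] at h
        obtain ⟨rfl, rfl⟩ := h
        rcases List.mem_cons.1 hc with rfl | hc
        · omega
        · rcases List.mem_cons.1 hc with rfl | hc'
          · omega
          · have := (List.pairwise_cons.1 ht).1 c hc'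
            omega
      · rcases List.mem_cons.1 hc with rfl | hc
        · have ha : a ∈ y :: u := mem_zip_fst h
          have := hx a ha
          omega
        · exact ih ht h c hc

theorem sorted_locate {r : List Int} (hs : r.Pairwise (· < ·)) (h : r ≠ []) (x : Int) :
    x < r.head h ∨ r.getLast h ≤ x ∨ ∃ p ∈ r.zip r.tail, p.1 ≤ x ∧ x < p.2 := by
  induction r with
  | nil => simp at h
  | cons a t ih =>
    cases t with
    | nil =>
      simp only [List.head_cons, List.getLast_singleton]
      omega
    | cons b u =>
      rcases List.pairwise_cons.1 hs with ⟨hx, ht⟩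
      rcases Int.lt_or_le x a with hxa | hax
      · left; simpa using hxa
      rcases Int.lt_or_le x b with hxb | hbx
      · right; right
        exact ⟨(a, b), by simp, hax, hxb⟩
      · rcases ih ht (by simp) with h1 | h2 | ⟨p, hp, hple⟩
        · simp at h1; omega
        · right; left
          rw [List.getLast_cons (by simp)]
          exact h2
        · right; right
          exact ⟨p, by simp only [List.tail_cons, List.zip_cons_cons, List.mem_cons]; right; exact hp,
            hple⟩

-- ---- inner min: index form = adjacent-pairs form ----
theorem range_pairs_nat (g : Int → Int → Int) (r : List Int) :
    (List.range (r.length - 1)).map (fun k => g (r.getD k 0) (r.getD (k + 1) 0))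
      = (r.zip r.tail).map (fun p => g p.1 p.2) := by
  induction r with
  | nil => simp
  | cons a t ih =>
    cases t with
    | nil => simp
    | cons b u =>
      have hlen : (a :: b :: u).length - 1 = ((b :: u).length - 1) + 1 := by simp
      rw [hlen, List.range_succ_eq_map, List.map_cons, List.map_map]
      simp only [List.tail_cons, List.zip_cons_cons, List.map_cons]
      congr 1

theorem range_pairs (g : Int → Int → Int) (r : List Int) :
    (PySem.List.pyRange 1 (r.length : Int) 1).map
        (fun i => g (PySem.List.pyGetD r (i - 1) 0) (PySem.List.pyGetD r i 0))
      = (r.zip r.tail).map (fun p => g p.1 p.2) := by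
  rw [PySem.List.pyRange_one, List.map_map]
  have h1 : ((r.length : Int) - 1).toNat = r.length - 1 := by omega
  rw [h1, ← range_pairs_nat g r]
  apply List.map_congr_left
  intro k hk
  simp only [Function.comp_apply]
  have e1 : (1 : Int) + (k : Int) - 1 = ((k : Nat) : Int) := by omega
  have e2 : (1 : Int) + (k : Int) = (((k + 1 : Nat)) : Int) := by omega
  rw [e1, e2, PySem.List.pyGetD_natCast, PySem.List.pyGetD_natCast]

theorem range_pairs_gP (n : Int) (r : List Int) :
    (PySem.List.pyRange 1 (r.length : Int) 1).map (fun i =>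
        min (PySem.List.pyGetD r (i - 1) 0 * 2 + n - PySem.List.pyGetD r i 0)
            ((n - PySem.List.pyGetD r i 0) * 2 + PySem.List.pyGetD r (i - 1) 0))
      = (r.zip r.tail).map (fun p => min (p.1 * 2 + n - p.2) ((n - p.2) * 2 + p.1)) := by
  simpa using range_pairs (fun a b => min (a * 2 + n - b) ((n - b) * 2 + a)) r

-- ---- vertical cost ----
theorem pvCharDict_lit : pvCharDict
    = PySem.Dict.mk [('A', 0), ('B', 1), ('C', 2), ('D', 3), ('E', 4), ('F', 5), ('G', 6),
        ('H', 7), ('I', 8), ('J', 9), ('K', 10), ('L', 11), ('M', 12), ('N', 13), ('O', 12),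
        ('P', 11), ('Q', 10), ('R', 9), ('S', 8), ('T', 7), ('U', 6), ('V', 5), ('W', 4),
        ('X', 3), ('Y', 2), ('Z', 1)] := by decide

theorem pvUpper_lit : pvUpper = ['A', 'B', 'C', 'D', 'E', 'F', 'G', 'H', 'I', 'J', 'K', 'L',
    'M', 'N', 'O', 'P', 'Q', 'R', 'S', 'T', 'U', 'V', 'W', 'X', 'Y', 'Z'] := by decide

theorem mem_upper_of_bounds (k : Nat) (h1 : 65 ≤ k) (h2 : k ≤ 90) : Char.ofNat k ∈ pvUpper := by
  interval_cases k <;> decide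

theorem dict_val (c : Char) (h1 : 65 ≤ c.toNat) (h2 : c.toNat ≤ 90) :
    (pvCharDict.get? c).getD 0 = min ((c.toNat : Int) - 65) (91 - (c.toNat : Int)) := by
  have hmem : c ∈ pvUpper := by
    have := mem_upper_of_bounds c.toNat h1 h2
    rwa [Char.ofNat_toNat] at this
  rw [pvCharDict_lit]
  revert hmem
  rw [pvUpper_lit]
  intro hmem
  fin_cases hmem <;> decide

theorem index_val (c : Char) (h1 : 65 ≤ c.toNat) (h2 : c.toNat ≤ 90) :
    ((PySem.List.index? pvUpper c).getD 0 : Nat) = c.toNat - 65 := by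
  have hmem : c ∈ pvUpper := by
    have := mem_upper_of_bounds c.toNat h1 h2
    rwa [Char.ofNat_toNat] at this
  revert hmem
  rw [pvUpper_lit]
  intro hmem
  fin_cases hmem <;> decide

theorem foldl_add_congr (F G : Char → Int) (l : List Char) (h : ∀ c ∈ l, F c = G c) :
    ∀ s : Int, l.foldl (fun s c => s + F c) s = l.foldl (fun s c => s + G c) s := by
  induction l with
  | nil => intro s; rfl
  | cons x t ih =>
    intro s
    simp only [List.foldl_cons]
    rw [h x (by simp), ih (fun c hc => h c (by simp [hc]))]

-- ---- B's move: basic facts ----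
theorem fI_nonneg (cs : List Char) (i : Nat) (hi : i < cs.length) : 0 ≤ fI cs i := by
  have h1 := nextNonA_ge cs (i + 1)
  have h2 := nextNonA_le cs (i + 1) (by omega)
  unfold fI
  omega

theorem moveOf_le (cs : List Char) (i : Nat) (hi : i < cs.length) : moveOf cs ≤ fI cs i := by
  unfold moveOf
  set cands := (List.range cs.length).map (fun (i : Nat) => fI cs i) with hc
  have hne : cands ≠ [] := by
    intro hnil
    rw [hc] at hnil
    have := congrArg List.length hnil
    simp only [List.length_map, List.length_range, List.length_nil] at this
    omega
  rcases hm : PySem.List.min? cands (fun x => x) with _ | m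
  · exact absurd ((PySem.List.min?_eq_none_iff cands _).1 hm) hne
  · have hmin := PySem.List.min?_isMin hm (fI cs i)
      (by simp [hc]; exact ⟨i, hi, rfl⟩)
    simpa using hmin

theorem moveOf_cases (cs : List Char) (h : cs.length ≠ 0) :
    ∃ i, i < cs.length ∧ moveOf cs = fI cs i := by
  unfold moveOf
  set cands := (List.range cs.length).map (fun (i : Nat) => fI cs i) with hc
  rcases hm : PySem.List.min? cands (fun x => x) with _ | m
  · have := (PySem.List.min?_eq_none_iff cands _).1 hm
    rw [hc] at this
    have := congrArg List.length this
    simp only [List.length_map, List.length_range, List.length_nil] at this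
    omega
  · have := PySem.List.min?_mem hm
    rw [hc] at this
    simp only [List.mem_map, List.mem_range] at this
    obtain ⟨i, hi, hfi⟩ := this
    exact ⟨i, hi, by simp [hfi.symm]⟩

theorem moveOf_nil (cs : List Char) (h : cs.length = 0) : moveOf cs = 0 := by
  unfold moveOf
  rw [h]
  rfl

-- ---- vertical equality under Pre_ ----
theorem vert_eq (name : String) (hpre : Pre_solution name) :
    name.toList.foldl (fun s c => s + ((pvCharDict.get? c).getD 0)) 0
      = name.toList.foldl (fun s c =>
          s + min (((PySem.List.index? pvUpper c).getD 0 : Nat) : Int) (26 - (((PySem.List.index? pvUpper c).getD 0 : Nat) : Int))) 0 := by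
  have := foldl_add_congr (fun c => (pvCharDict.get? c).getD 0)
      (fun c => min (((PySem.List.index? pvUpper c).getD 0 : Nat) : Int) (26 - (((PySem.List.index? pvUpper c).getD 0 : Nat) : Int))) name.toList
      (fun c hc => by
        have h := List.all_eq_true.1 hpre c hc
        simp only [Bool.and_eq_true, decide_eq_true_eq] at h
        have hd := dict_val c h.1 h.2
        have hi := index_val c h.1 h.2
        dsimp only
        omega) 0
  simpa using this

-- ===== VERDICT (by name: the statement is the Claim_ definition above) =====
theorem solution_spec : Claim_equal_solution := by
  unfold Claim_equal_solution
  intro name _ hpre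
  unfold Spec_solution
  rw [alt_eq]
  unfold solution
  rw [vert_eq name hpre, PySem.Str.len_eq]
  rcases hreq : pvRequired name with _ | ⟨r0, _ | ⟨r1, rest⟩⟩ <;> simp only [hreq]
  -- case required = []
  · have hmv : moveOf name.toList = 0 := by
      by_cases h0 : name.toList.length = 0
      · exact moveOf_nil _ h0
      · have hN : nextNonA name.toList 1 = name.toList.length := by
          apply nextNonA_req name 1 _ le_rfl (by omega) le_rfl
          · intro k _ _
            rw [hreq]
            simp
          · exact Or.inl rfl
        have hle := moveOf_le name.toList 0 (by omega)
        have hf0 : fI name.toList 0 = 0 := by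
          unfold fI
          simp only [Nat.zero_add]
          omega
        obtain ⟨i, hi, hmem⟩ := moveOf_cases name.toList h0
        have := fI_nonneg name.toList i hi
        omega
    rw [hmv]
    omega
  -- case required = [r0]
  · obtain ⟨h1, h2, _⟩ := (mem_pvRequired name r0).1 (by rw [hreq]; simp)
    have hmR : ((r0.toNat : Nat) : Int) ∈ pvRequired name := by
      rw [hreq]
      simp
      omega
    have hlb : ∀ i : Nat, i < name.toList.length →
        min r0 ((name.toList.length : Int) - r0) ≤ fI name.toList i := by
      intro i hi
      by_cases hir : (i : Int) < r0
      · have hN : nextNonA name.toList (i + 1) = r0.toNat := by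
          apply nextNonA_req name (i + 1) _ (by omega) (by omega) (by omega)
          · intro k _ hk2
            rw [hreq]
            simp
            omega
          · exact Or.inr hmR
        unfold fI
        omega
      · have hN : nextNonA name.toList (i + 1) = name.toList.length := by
          apply nextNonA_req name (i + 1) _ (by omega) (by omega) le_rfl
          · intro k hk1 _
            rw [hreq]
            simp
            omega
          · exact Or.inl rfl
        unfold fI
        omega
    have hle1 := moveOf_le name.toList 0 (by omega)
    have hf0 : fI name.toList 0 = (name.toList.length : Int) - r0 := by
      have hN : nextNonA name.toList 1 = r0.toNat := by
        apply nextNonA_req name 1 _ le_rfl (by omega) (by omega)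
        · intro k _ hk2
          rw [hreq]
          simp
          omega
        · exact Or.inr hmR
      unfold fI
      simp only [Nat.zero_add]
      omega
    have hle2 := moveOf_le name.toList r0.toNat (by omega)
    have hf1 : fI name.toList r0.toNat = r0 := by
      have hN : nextNonA name.toList (r0.toNat + 1) = name.toList.length := by
        apply nextNonA_req name _ _ (by omega) (by omega) le_rfl
        · intro k hk1 _
          rw [hreq]
          simp
          omega
        · exact Or.inl rfl
      unfold fI
      omega
    obtain ⟨i, hi, hmem⟩ := moveOf_cases name.toList (by omega)
    have hmv : moveOf name.toList = min r0 ((name.toList.length : Int) - r0) := by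
      have := hlb i hi
      omega
    rw [hmv]
  -- case required = r0 :: r1 :: rest
  · have hne' : (r0 :: r1 :: rest) ≠ [] := by simp
    have hs : (r0 :: r1 :: rest).Pairwise (· < ·) := hreq ▸ pvRequired_sorted name
    have hmemr : ∀ c ∈ (r0 :: r1 :: rest), 1 ≤ c ∧ c < (name.toList.length : Int) := by
      intro c hc
      have := (mem_pvRequired name c).1 (by rw [hreq]; exact hc)
      exact ⟨this.1, this.2.1⟩
    rw [range_pairs_gP ((name.toList.length : Int)) (r0 :: r1 :: rest),
        PySem.List.pyGetD_neg_one _ _ hne', PySem.List.pyGetD_zero_cons]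
    set L := (r0 :: r1 :: rest).getLast hne' with hLdef
    have hLmem : L ∈ (r0 :: r1 :: rest) := List.getLast_mem hne'
    obtain ⟨hL1, hL2⟩ := hmemr L hLmem
    obtain ⟨h01, h02⟩ := hmemr r0 (by simp)
    -- generic membership → cast trick
    have hcastmem : ∀ c ∈ (r0 :: r1 :: rest), ((c.toNat : Nat) : Int) ∈ pvRequired name := by
      intro c hc
      have h1c := (hmemr c hc).1
      have : ((c.toNat : Nat) : Int) = c := by omega
      rw [this, hreq]
      exact hc
    rcases hPm : PySem.List.min? (((r0 :: r1 :: rest).zip (r0 :: r1 :: rest).tail).map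
        (fun p => min (p.1 * 2 + (name.toList.length : Int) - p.2)
          (((name.toList.length : Int) - p.2) * 2 + p.1))) (fun x => x) with _ | pm
    · have := (PySem.List.min?_eq_none_iff _ _).1 hPm
      simp at this
    · -- pm is the min over adjacent pairs
      have hpm_mem := PySem.List.min?_mem hPm
      simp only [List.mem_map] at hpm_mem
      obtain ⟨⟨a, b⟩, habz, hpmv⟩ := hpm_mem
      have hpm_min : ∀ p ∈ ((r0 :: r1 :: rest).zip (r0 :: r1 :: rest).tail),
          pm ≤ min (p.1 * 2 + (name.toList.length : Int) - p.2)
            (((name.toList.length : Int) - p.2) * 2 + p.1) := by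
        intro p hp
        have := PySem.List.min?_isMin hPm _ (List.mem_map.2 ⟨p, hp, rfl⟩)
        simpa using this
      -- witnesses: moveOf ≤ each of the three components
      have hu1 : moveOf name.toList ≤ (name.toList.length : Int) - r0 := by
        have hN : nextNonA name.toList 1 = r0.toNat := by
          apply nextNonA_req name 1 _ le_rfl (by omega) (by omega)
          · intro k _ hk2
            intro hk
            rw [hreq] at hk
            have := sorted_head_le hs hne' _ hk
            simp at this
            omega
          · exact Or.inr (hcastmem r0 (by simp))
        have hle := moveOf_le name.toList 0 (by omega)
        have hf0 : fI name.toList 0 = (name.toList.length : Int) - r0 := by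
          unfold fI
          simp only [Nat.zero_add]
          omega
        omega
      have hu2 : moveOf name.toList ≤ L := by
        have hN : nextNonA name.toList (L.toNat + 1) = name.toList.length := by
          apply nextNonA_req name _ _ (by omega) (by omega) le_rfl
          · intro k hk1 _
            intro hk
            rw [hreq] at hk
            have := sorted_le_last hs hne' _ hk
            rw [← hLdef] at this
            omega
          · exact Or.inl rfl
        have hle := moveOf_le name.toList L.toNat (by omega)
        have hfL : fI name.toList L.toNat = L := by
          unfold fI
          omega
        omega
      have hu3 : moveOf name.toList ≤ pm := by
        obtain ⟨ha1, ha2⟩ := hmemr a (mem_zip_fst habz)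
        obtain ⟨hb1, hb2⟩ := hmemr b (mem_zip_snd habz)
        have hab : a < b := zip_lt hs habz
        have hN : nextNonA name.toList (a.toNat + 1) = b.toNat := by
          apply nextNonA_req name _ _ (by omega) (by omega) (by omega)
          · intro k hk1 hk2
            intro hk
            rw [hreq] at hk
            have := sorted_gap hs habz _ hk
            omega
          · exact Or.inr (hcastmem b (mem_zip_snd habz))
        have hle := moveOf_le name.toList a.toNat (by omega)
        have hfa : fI name.toList a.toNat = min (a * 2 + (name.toList.length : Int) - b)
            (((name.toList.length : Int) - b) * 2 + a) := by
          unfold fI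
          omega
        omega
      -- lower bound
      have hlb : ∀ i : Nat, i < name.toList.length →
          min (min pm L) ((name.toList.length : Int) - r0) ≤ fI name.toList i := by
        intro i hi
        rcases sorted_locate hs hne' (i : Int) with hx | hx | ⟨⟨a', b'⟩, habz', ha1', ha2'⟩
        · simp only [List.head_cons] at hx
          have hN : nextNonA name.toList (i + 1) = r0.toNat := by
            apply nextNonA_req name _ _ (by omega) (by omega) (by omega)
            · intro k _ hk2
              intro hk
              rw [hreq] at hk
              have := sorted_head_le hs hne' _ hk
              simp at this
              omega
            · exact Or.inr (hcastmem r0 (by simp))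
          unfold fI
          omega
        · rw [← hLdef] at hx
          have hN : nextNonA name.toList (i + 1) = name.toList.length := by
            apply nextNonA_req name _ _ (by omega) (by omega) le_rfl
            · intro k hk1 _
              intro hk
              rw [hreq] at hk
              have := sorted_le_last hs hne' _ hk
              rw [← hLdef] at this
              omega
            · exact Or.inl rfl
          unfold fI
          omega
        · obtain ⟨ha1, ha2⟩ := hmemr a' (mem_zip_fst habz')
          obtain ⟨hb1, hb2⟩ := hmemr b' (mem_zip_snd habz')
          have hN : nextNonA name.toList (i + 1) = b'.toNat := by
            apply nextNonA_req name _ _ (by omega) (by omega) (by omega)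
            · intro k hk1 hk2
              intro hk
              rw [hreq] at hk
              have := sorted_gap hs habz' _ hk
              omega
            · exact Or.inr (hcastmem b' (mem_zip_snd habz'))
          have hterm := hpm_min (a', b') habz'
          unfold fI
          simp only at hterm
          omega
      obtain ⟨i, hi, hmem⟩ := moveOf_cases name.toList (by omega)
      have hmv : moveOf name.toList = min (min pm L) ((name.toList.length : Int) - r0) := by
        have := hlb i hi
        omega
      rw [hmv, hPm]
      simp only [Option.getD_some]
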